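-- pv_equiv track=rewrite | github.com/Cobord/Plabic | plabic/cyclic_utils.py | cyclic_equal
-- ===== SOURCE A (Python) =====
-- from typing import List, Optional, Protocol, Tuple, TypeVar
--
-- T = TypeVar("T")
--
-- def cyclic_equal(a_list: List[T], b_list: List[T]) -> bool:
--     """
--     some cyclic permutation of a_list is equal to b_list
--     """
--     if len(a_list) != len(b_list):
--         return False
--     for shift in range(len(a_list)):
--         up_to = len(b_list) - shift
--         first_part = a_list[shift:len(a_list)] == b_list[0:up_to]
--         second_part = a_list[0:shift] == b_list[up_to:len(b_list)]
--         if first_part and second_part: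
--             return True
--     return False
-- ===== SOURCE B (Python) =====
-- def cyclic_equal(a_list, b_list):
--     """
--     some cyclic permutation of a_list is equal to b_list
--     (Rabin-Karp: compare a rolling polynomial hash of each rotation of
--     a_list against the hash of b_list; do the full comparison only on a
--     hash hit, so the expected work is linear instead of quadratic)
--     """
--     n = len(b_list)
--     if len(a_list) != n:
--         return False
--     if n == 0:
--         return True
--     MOD = (1 << 61) - 1
--     BASE = 1000003
--     target = 0
--     for x in b_list:
--         target = (target * BASE + x % MOD) % MOD
--     window = 0
--     for x in a_list:
--         window = (window * BASE + x % MOD) % MOD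
--     doubled = a_list + a_list
--     pw = pow(BASE, n - 1, MOD)
--     start = 0
--     for x in a_list:
--         if window == target and doubled[start:start + n] == b_list:
--             return True
--         hx = x % MOD
--         window = ((window - hx * pw) * BASE + hx) % MOD
--         start += 1
--     return False
-- ===== Notes on version B (the rewrite author's own statement) =====
-- stated objective: faster
-- what changed: B uses Rabin-Karp: it compares a rolling polynomial hash of each rotation of a_list against the hash of b_list and does the full list comparison only on a hash hit, instead of A's two slice comparisons per shift.
-- intended difference: On the input ([], []) A returns False because its shift loop is empty, while B returns True, which is intended: the empty list is a cyclic rotation of itself. — e.g. on cyclic_equal([], []): A returns false, B returns true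
import Mathlib
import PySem

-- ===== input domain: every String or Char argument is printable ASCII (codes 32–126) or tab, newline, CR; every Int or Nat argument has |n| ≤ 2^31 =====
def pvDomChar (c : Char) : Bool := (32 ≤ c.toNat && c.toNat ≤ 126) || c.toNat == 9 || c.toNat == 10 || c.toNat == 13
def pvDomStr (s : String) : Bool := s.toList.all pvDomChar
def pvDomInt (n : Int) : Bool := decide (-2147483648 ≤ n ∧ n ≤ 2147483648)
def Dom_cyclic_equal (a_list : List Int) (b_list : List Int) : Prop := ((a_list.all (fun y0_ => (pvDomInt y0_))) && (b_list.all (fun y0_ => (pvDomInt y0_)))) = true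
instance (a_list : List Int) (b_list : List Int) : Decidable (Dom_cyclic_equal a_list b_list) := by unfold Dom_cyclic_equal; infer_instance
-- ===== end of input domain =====

-- B replaces A's per-shift slice comparisons by a Rabin–Karp rolling polynomial hash of the
-- rotations (full comparison only on a hash hit), a different algorithm with linear expected work.

-- ===== PORT A =====
def cyclic_equal (a_list : List Int) (b_list : List Int) : Bool :=
  if a_list.length != b_list.length then false
  else
    (PySem.List.pyRange 0 (a_list.length : Int) 1).any (fun shift =>
      let up_to : Int := (b_list.length : Int) - shift
      let first_part :=
        PySem.List.slice a_list (some shift) (some (a_list.length : Int)) ==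
          PySem.List.slice b_list (some 0) (some up_to)
      let second_part :=
        PySem.List.slice a_list (some 0) (some shift) ==
          PySem.List.slice b_list (some up_to) (some (b_list.length : Int))
      first_part && second_part)

-- ===== PORT B =====
def pvMOD : Int := 2 ^ 61 - 1      -- Python: MOD = (1 << 61) - 1
def pvBASE : Int := 1000003

-- the 'for x in a_list' search loop of Source B (early return -> structural recursion)
def cyclicAltLoop (doubled b_list : List Int) (n target pw : Int) :
    List Int → Int → Int → Bool
  | [], _, _ => false
  | x :: rest, window, start =>
    if window == target &&
        (PySem.List.slice doubled (some start) (some (start + n)) == b_list) then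
      true
    else
      let hx := PySem.Int.mod x pvMOD
      cyclicAltLoop doubled b_list n target pw rest
        (PySem.Int.mod ((window - hx * pw) * pvBASE + hx) pvMOD) (start + 1)

def cyclic_equal_alt (a_list : List Int) (b_list : List Int) : Bool :=
  let n : Int := (b_list.length : Int)
  if (a_list.length : Int) != n then false
  else if n == 0 then true
  else
    let target := b_list.foldl
      (fun t x => PySem.Int.mod (t * pvBASE + PySem.Int.mod x pvMOD) pvMOD) 0
    let window := a_list.foldl
      (fun t x => PySem.Int.mod (t * pvBASE + PySem.Int.mod x pvMOD) pvMOD) 0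
    let doubled := a_list ++ a_list
    let pw := PySem.Int.powMod pvBASE (n - 1).toNat pvMOD
    cyclicAltLoop doubled b_list n target pw a_list window 0

-- ===== PRECONDITION & SPEC =====
-- On ([], []) A returns False because its shift loop is empty, while B returns True,
-- which is intended: the empty list is a cyclic rotation of itself.
def D_cyclic_equal (a_list : List Int) (b_list : List Int) : Prop :=
  a_list = [] ∧ b_list = []
instance (a_list : List Int) (b_list : List Int) : Decidable (D_cyclic_equal a_list b_list) := by
  unfold D_cyclic_equal; infer_instance

def Spec_cyclic_equal (a_list : List Int) (b_list : List Int) (out : Bool) : Prop :=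
  ¬ D_cyclic_equal a_list b_list → out = cyclic_equal_alt a_list b_list
instance (a_list : List Int) (b_list : List Int) (out : Bool) : Decidable (Spec_cyclic_equal a_list b_list out) := by
  unfold Spec_cyclic_equal; infer_instance

def pvDiffWitness_cyclic_equal : List Int × List Int := ([], [])
def pvDiffWitnessOut_cyclic_equal : Bool × Bool := (false, true)

-- ===== CLAIM (what is proved, stated in full; the proofs are below) =====
def Claim_unchanged_cyclic_equal : Prop := ∀ (a_list : List Int) (b_list : List Int), Dom_cyclic_equal a_list b_list → Spec_cyclic_equal a_list b_list (cyclic_equal a_list b_list)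
def Claim_changed_cyclic_equal : Prop := Dom_cyclic_equal (pvDiffWitness_cyclic_equal.1) (pvDiffWitness_cyclic_equal.2) ∧ D_cyclic_equal (pvDiffWitness_cyclic_equal.1) (pvDiffWitness_cyclic_equal.2) ∧ cyclic_equal (pvDiffWitness_cyclic_equal.1) (pvDiffWitness_cyclic_equal.2) = pvDiffWitnessOut_cyclic_equal.1 ∧ cyclic_equal_alt (pvDiffWitness_cyclic_equal.1) (pvDiffWitness_cyclic_equal.2) = pvDiffWitnessOut_cyclic_equal.2 ∧ pvDiffWitnessOut_cyclic_equal.1 ≠ pvDiffWitnessOut_cyclic_equal.2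
def Claim_exact_cyclic_equal : Prop := ∀ (a_list : List Int) (b_list : List Int), Dom_cyclic_equal a_list b_list → D_cyclic_equal a_list b_list → cyclic_equal a_list b_list ≠ cyclic_equal_alt a_list b_list

-- ===== LEMMAS AND PROOFS =====
def pvStep (t x : Int) : Int := (t * pvBASE + x % pvMOD) % pvMOD
def pvHash (l : List Int) : Int := l.foldl pvStep 0

theorem pvMOD_pos : (0 : Int) < pvMOD := by norm_num [pvMOD]

theorem pmod_eq (y : Int) : PySem.Int.mod y pvMOD = y % pvMOD :=
  PySem.Int.mod_eq_emod_of_pos pvMOD_pos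

theorem split_eq (x y b : List Int) (m : Nat) (hx : x.length = m) :
    x ++ y = b ↔ x = b.take m ∧ y = b.drop m := by
  constructor
  · intro h; subst h
    exact ⟨(List.take_left' hx).symm, (List.drop_left' hx).symm⟩
  · rintro ⟨h1, h2⟩; subst h1; subst h2; exact List.take_append_drop m b

theorem keyB (a b : List Int) (hlen : a.length = b.length) (s : Int) (h0 : 0 ≤ s)
    (h1 : s ≤ (b.length : Int)) :
    ((PySem.List.slice (a ++ a) (some s) (some (s + (b.length : Int))) == b) = true ↔
      a.drop s.toNat ++ a.take s.toNat = b) := by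
  rw [PySem.List.slice_toNat (a ++ a) h0 (by omega)]
  have h2 : (s + (b.length : Int)).toNat - s.toNat = b.length := by omega
  rw [h2, List.drop_append_of_le_length (by omega : s.toNat ≤ a.length), List.take_append]
  have hd : (a.drop s.toNat).take b.length = a.drop s.toNat :=
    List.take_of_length_le (by simp; omega)
  have ht : b.length - (a.drop s.toNat).length = s.toNat := by simp; omega
  rw [hd, ht, beq_iff_eq]

theorem keyA (a b : List Int) (hlen : a.length = b.length) (s : Int) (h0 : 0 ≤ s)
    (h1 : s < (b.length : Int)) :
    (((PySem.List.slice a (some s) (some (a.length : Int)) ==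
        PySem.List.slice b (some 0) (some ((b.length : Int) - s))) &&
      (PySem.List.slice a (some 0) (some s) ==
        PySem.List.slice b (some ((b.length : Int) - s)) (some (b.length : Int)))) = true ↔
      a.drop s.toNat ++ a.take s.toNat = b) := by
  rw [PySem.List.slice_toNat a h0 (by omega), PySem.List.slice_toNat b (le_refl 0) (by omega),
      PySem.List.slice_toNat a (le_refl 0) h0, PySem.List.slice_toNat b (by omega) (by omega)]
  have e1 : (a.drop s.toNat).take ((a.length : Int).toNat - s.toNat) = a.drop s.toNat :=
    List.take_of_length_le (by simp)
  have e2 : (b.drop (0:Int).toNat).take (((b.length : Int) - s).toNat - (0:Int).toNat)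
      = b.take (b.length - s.toNat) := by
    simp; omega
  have e3 : (a.drop (0:Int).toNat).take (s.toNat - (0:Int).toNat) = a.take s.toNat := by simp
  have e4 : (b.drop ((b.length : Int) - s).toNat).take
      ((b.length : Int).toNat - ((b.length : Int) - s).toNat)
      = b.drop (b.length - s.toNat) := by
    have : ((b.length : Int) - s).toNat = b.length - s.toNat := by omega
    rw [this]
    exact List.take_of_length_le (by simp)
  rw [e1, e2, e3, e4, Bool.and_eq_true, beq_iff_eq, beq_iff_eq]
  rw [split_eq (a.drop s.toNat) (a.take s.toNat) b (b.length - s.toNat) (by simp; omega)]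

-- shifting the accumulator of the hash fold, mod pvMOD
theorem foldl_shift (r : List Int) : ∀ (a : Int),
    List.foldl pvStep a r ≡ a * pvBASE ^ r.length + List.foldl pvStep 0 r [ZMOD pvMOD] := by
  induction r with
  | nil => intro a; simp [Int.ModEq.refl]
  | cons y r ih =>
    intro a
    have hred : ∀ t : Int, pvStep t y ≡ t * pvBASE + y % pvMOD [ZMOD pvMOD] := by
      intro t; exact Int.emod_emod_of_dvd _ dvd_rfl
    have h1 : List.foldl pvStep a (y :: r)
        ≡ (pvStep a y) * pvBASE ^ r.length + List.foldl pvStep 0 r [ZMOD pvMOD] := ih _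
    have h2 : (pvStep a y) * pvBASE ^ r.length + List.foldl pvStep 0 r
        ≡ (a * pvBASE + y % pvMOD) * pvBASE ^ r.length + List.foldl pvStep 0 r [ZMOD pvMOD] :=
      Int.ModEq.add_right _ (Int.ModEq.mul_right _ (hred a))
    have h3 : List.foldl pvStep 0 (y :: r)
        ≡ (pvStep 0 y) * pvBASE ^ r.length + List.foldl pvStep 0 r [ZMOD pvMOD] := ih _
    have h4 : a * pvBASE ^ (y :: r).length + List.foldl pvStep 0 (y :: r)
        ≡ a * pvBASE ^ (y :: r).length
          + ((0 * pvBASE + y % pvMOD) * pvBASE ^ r.length + List.foldl pvStep 0 r)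
        [ZMOD pvMOD] := by
      refine Int.ModEq.add_left _ (h3.trans ?_)
      exact Int.ModEq.add_right _ (Int.ModEq.mul_right _ (hred 0))
    refine (h1.trans h2).trans (Int.ModEq.trans ?_ h4.symm)
    have : (a * pvBASE + y % pvMOD) * pvBASE ^ r.length + List.foldl pvStep 0 r
        = a * pvBASE ^ (y :: r).length
          + ((0 * pvBASE + y % pvMOD) * pvBASE ^ r.length + List.foldl pvStep 0 r) := by
      simp [List.length_cons]; ring
    rw [this]

theorem hash_cons (x : Int) (r : List Int) :
    pvHash (x :: r) ≡ (x % pvMOD) * pvBASE ^ r.length + pvHash r [ZMOD pvMOD] := by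
  have h0 : pvStep 0 x = x % pvMOD % pvMOD := by simp [pvStep]
  have : pvHash (x :: r) = List.foldl pvStep (x % pvMOD % pvMOD) r := by
    simp [pvHash, List.foldl_cons, h0]
  rw [this]
  refine (foldl_shift r _).trans ?_
  refine Int.ModEq.add_right _ (Int.ModEq.mul_right _ ?_)
  exact Int.emod_emod_of_dvd _ dvd_rfl

theorem hash_snoc (r : List Int) (x : Int) :
    pvHash (r ++ [x]) = (pvHash r * pvBASE + x % pvMOD) % pvMOD := by
  simp [pvHash, List.foldl_append, pvStep]

-- the rolling-hash slide: hashing a rotation one step further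
theorem slide (x : Int) (r : List Int) :
    PySem.Int.mod ((pvHash (x :: r) - (PySem.Int.mod x pvMOD) * (pvBASE ^ r.length % pvMOD))
        * pvBASE + PySem.Int.mod x pvMOD) pvMOD = pvHash (r ++ [x]) := by
  rw [pmod_eq, pmod_eq, hash_snoc]
  have h1 : (x % pvMOD) * (pvBASE ^ r.length % pvMOD)
      ≡ (x % pvMOD) * pvBASE ^ r.length [ZMOD pvMOD] :=
    Int.ModEq.mul_left _ (Int.emod_emod_of_dvd _ dvd_rfl)
  have h2 : pvHash (x :: r) - (x % pvMOD) * (pvBASE ^ r.length % pvMOD)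
      ≡ pvHash r [ZMOD pvMOD] := by
    have := (hash_cons x r).sub h1
    simpa using this
  exact (Int.ModEq.add_right _ (Int.ModEq.mul_right _ h2))

-- the search loop finds exactly the shifts whose rotation equals b
theorem loopIff (a b : List Int) (hlen : a.length = b.length) :
    ∀ (k s : Nat), a.length - s = k → s ≤ a.length →
    (cyclicAltLoop (a ++ a) b (b.length : Int) (pvHash b)
        (pvBASE ^ (b.length - 1) % pvMOD)
        (a.drop s) (pvHash (a.drop s ++ a.take s)) (s : Int) = true
      ↔ ∃ t : Nat, s ≤ t ∧ t < a.length ∧ a.drop t ++ a.take t = b) := by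
  intro k
  induction k with
  | zero =>
    intro s hk hs
    have hse : s = a.length := by omega
    subst hse
    simp [cyclicAltLoop, List.drop_length]
    omega
  | succ k ih =>
    intro s hk hs
    have hlt : s < a.length := by omega
    obtain ⟨x, hdrop⟩ : ∃ x, a.drop s = x :: a.drop (s + 1) :=
      ⟨a[s], List.drop_eq_getElem_cons hlt⟩
    have hxs : a[s]? = some x := by
      have := congrArg (fun l => l[0]?) hdrop
      simpa [List.getElem?_drop] using this
    have htail : a.drop s ++ a.take s = x :: (a.drop (s + 1) ++ a.take s) := by
      rw [hdrop, List.cons_append]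
    rw [hdrop, cyclicAltLoop, ← hdrop]
    by_cases hrot : a.drop s ++ a.take s = b
    · have hslice : (PySem.List.slice (a ++ a) (some (s : Int))
          (some ((s : Int) + (b.length : Int))) == b) = true := by
        rw [keyB a b hlen (s : Int) (by positivity) (by omega)]
        simpa using hrot
      have hw : (pvHash (a.drop s ++ a.take s) == pvHash b) = true := by
        rw [hrot]; simp
      rw [hslice, hw]
      simp only [Bool.and_self, if_true, true_iff]
      exact ⟨s, le_refl s, hlt, hrot⟩
    · have hslice : (PySem.List.slice (a ++ a) (some (s : Int))
          (some ((s : Int) + (b.length : Int))) == b) = false := by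
        rw [Bool.eq_false_iff, ne_eq, keyB a b hlen (s : Int) (by positivity) (by omega)]
        simpa using hrot
      rw [hslice, Bool.and_false, if_neg (by simp)]
      -- the slide step: the new window is the hash of the next rotation
      have hnext : a.drop (s + 1) ++ a.take (s + 1)
          = (a.drop (s + 1) ++ a.take s) ++ [x] := by
        rw [List.take_add_one, hxs]
        simp
      have hlenr : (a.drop (s + 1) ++ a.take s).length = b.length - 1 := by
        simp; omega
      have hwin : PySem.Int.mod
          ((pvHash (a.drop s ++ a.take s)
              - PySem.Int.mod x pvMOD * (pvBASE ^ (b.length - 1) % pvMOD)) * pvBASE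
            + PySem.Int.mod x pvMOD) pvMOD
          = pvHash (a.drop (s + 1) ++ a.take (s + 1)) := by
        rw [htail, hnext, ← hlenr]
        exact slide x (a.drop (s + 1) ++ a.take s)
      have hcast : ((s : Int) + 1) = ((s + 1 : Nat) : Int) := by push_cast; ring
      simp only [hwin, hcast]
      rw [ih (s + 1) (by omega) (by omega)]
      constructor
      · rintro ⟨t, ht1, ht2, ht3⟩; exact ⟨t, by omega, ht2, ht3⟩
      · rintro ⟨t, ht1, ht2, ht3⟩
        refine ⟨t, ?_, ht2, ht3⟩
        rcases Nat.eq_or_lt_of_le ht1 with h | h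
        · exact absurd (h ▸ ht3) hrot
        · omega

theorem cyclic_main (a b : List Int) (hab : ¬(a = [] ∧ b = [])) :
    cyclic_equal a b = cyclic_equal_alt a b := by
  unfold cyclic_equal cyclic_equal_alt
  by_cases hlen : a.length = b.length
  · have h1 : (a.length != b.length) = false := by simp [hlen]
    have h2 : ((a.length : Int) != (b.length : Int)) = false := by simp [hlen]
    simp only [h1, h2, Bool.false_eq_true, if_false]
    have hb : b ≠ [] := by
      rintro rfl
      exact hab ⟨List.eq_nil_of_length_eq_zero (by simpa using hlen), rfl⟩
    have hn : 0 < b.length := List.length_pos_iff.mpr hb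
    have h3 : (((b.length : Int)) == 0) = false := by
      simp; omega
    simp only [h3, Bool.false_eq_true, if_false]
    -- rewrite B's folds as pvHash and its pw as the power mod pvMOD
    have hfold : ∀ l : List Int,
        l.foldl (fun t x => PySem.Int.mod (t * pvBASE + PySem.Int.mod x pvMOD) pvMOD) 0
          = pvHash l := by
      intro l
      unfold pvHash
      congr 1
      funext t x
      simp [pvStep, pmod_eq]
    have hpw : PySem.Int.powMod pvBASE ((b.length : Int) - 1).toNat pvMOD
        = pvBASE ^ (b.length - 1) % pvMOD := by
      unfold PySem.Int.powMod
      rw [pmod_eq]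
      congr 2
      omega
    rw [hfold a, hfold b, hpw]
    have hB := loopIff a b hlen (a.length) 0 (by omega) (by omega)
    simp only [Nat.cast_zero, List.drop_zero, List.take_zero, List.append_nil] at hB
    rw [Bool.eq_iff_iff, hB]
    simp only [List.any_eq_true, PySem.List.mem_pyRange_one]
    constructor
    · rintro ⟨s, ⟨hs0, hs1⟩, hp⟩
      rw [hlen] at hs1
      refine ⟨s.toNat, by omega, by omega, ?_⟩
      exact (keyA a b hlen s hs0 hs1).mp hp
    · rintro ⟨t, _, ht2, ht3⟩
      refine ⟨(t : Int), ⟨by positivity, by exact_mod_cast ht2⟩, ?_⟩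
      refine (keyA a b hlen (t : Int) (by positivity) (by rw [← hlen]; exact_mod_cast ht2)).mpr ?_
      simpa using ht3
  · have h1 : (a.length != b.length) = true := by simpa using hlen
    have h2 : ((a.length : Int) != (b.length : Int)) = true := by
      simp only [bne_iff_ne, ne_eq, Int.natCast_inj]; exact hlen
    simp [h1, h2]

-- ===== VERDICT (by name: the statement is the Claim_ definition above) =====
theorem cyclic_equal_spec : Claim_unchanged_cyclic_equal := by
  intro a b _ hD
  exact cyclic_main a b hD

theorem cyclic_equal_changed : Claim_changed_cyclic_equal := by
  unfold Claim_changed_cyclic_equal; decide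

theorem cyclic_equal_tight : Claim_exact_cyclic_equal := by
  intro a b _ hD
  obtain ⟨ha, hb⟩ := hD
  subst ha; subst hb; decide
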